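-- pv_equiv track=rewrite | github.com/itisdb/CodePro | Striver/cuteCat.py | cuteCat
-- ===== SOURCE A (Python) =====
-- def cuteCat(matrix, string):
-- 	res=[]
-- 	for i in matrix:
-- 		if i in string:
-- 			res.append("Yes")
-- 		else:
-- 			res.append("No")
-- 	return res
-- ===== SOURCE B (Python) =====
-- def cuteCat(matrix, string):
--     subs = set()
--     for L in {len(s) for s in matrix}:
--         for i in range(len(string) - L + 1):
--             subs.add(string[i:i+L])
--     return ["Yes" if s in subs else "No" for s in matrix]
-- ===== Notes on version B (the rewrite author's own statement) =====
-- stated objective: faster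
-- what changed: B never runs a per-entry substring search: it precomputes one hash set of all substrings of the haystack whose lengths occur in matrix (by slicing), then answers every query with a set-membership lookup; A runs Python's 'in' substring scan over the haystack for each of the k entries.
import Mathlib
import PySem

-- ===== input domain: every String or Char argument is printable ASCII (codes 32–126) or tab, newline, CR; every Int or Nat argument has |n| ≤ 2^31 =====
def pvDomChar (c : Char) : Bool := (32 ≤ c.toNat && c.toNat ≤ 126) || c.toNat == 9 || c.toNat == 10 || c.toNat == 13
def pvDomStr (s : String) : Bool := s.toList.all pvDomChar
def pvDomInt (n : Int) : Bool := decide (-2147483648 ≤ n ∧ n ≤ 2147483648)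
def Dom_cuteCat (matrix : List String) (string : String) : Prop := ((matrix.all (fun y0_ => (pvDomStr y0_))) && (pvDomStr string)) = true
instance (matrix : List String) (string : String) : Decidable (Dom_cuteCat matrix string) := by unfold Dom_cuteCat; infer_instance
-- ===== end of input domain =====

-- B precomputes the set of all substrings of the haystack whose lengths occur in matrix (by slicing)
-- and answers every query by set membership; A runs a substring search per entry (objective: alternative).

-- ===== PORT A =====
def cuteCat (matrix : List String) (string : String) : List String :=
  matrix.foldl
    (fun res i => if PySem.Str.isIn i string then res ++ ["Yes"] else res ++ ["No"])
    []

-- ===== PORT B =====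
-- subs: for L in {len(s) for s in matrix}: for i in range(len(string)-L+1): subs.add(string[i:i+L])
-- (subs is consumed only by membership, so the set-iteration order over the lengths is immaterial)
def cuteSubs (matrix : List String) (string : String) : PySem.Set String :=
  (PySem.Set.ofList (matrix.map (fun s => PySem.Str.len s))).foldl
    (fun subs L =>
      (PySem.List.pyRange 0 (PySem.Str.len string - L + 1) 1).foldl
        (fun subs i => subs.add (PySem.Str.slice string (some i) (some (i + L)))) subs)
    PySem.Set.empty

def cuteCat_alt (matrix : List String) (string : String) : List String :=
  let subs := cuteSubs matrix string
  matrix.map (fun s => if subs.contains s then "Yes" else "No")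

-- ===== PRECONDITION & SPEC =====
def Spec_cuteCat (matrix : List String) (string : String) (out : List String) : Prop := out = cuteCat_alt matrix string
instance (matrix : List String) (string : String) (out : List String) : Decidable (Spec_cuteCat matrix string out) := by unfold Spec_cuteCat; infer_instance

-- ===== CLAIM (what is proved, stated in full; the proofs are below) =====
def Claim_equal_cuteCat : Prop := ∀ (matrix : List String) (string : String), Dom_cuteCat matrix string → Spec_cuteCat matrix string (cuteCat matrix string)

-- ===== LEMMAS AND PROOFS =====

-- membership in the nested fold building cuteSubs (generalized accumulator)
theorem mem_nested_fold (string : String) (Ls : List Int) (acc : PySem.Set String) (y : String) :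
    y ∈ Ls.foldl
        (fun subs L =>
          (PySem.List.pyRange 0 (PySem.Str.len string - L + 1) 1).foldl
            (fun subs i => subs.add (PySem.Str.slice string (some i) (some (i + L)))) subs)
        acc ↔
      y ∈ acc ∨ ∃ L ∈ Ls, ∃ i ∈ PySem.List.pyRange 0 (PySem.Str.len string - L + 1) 1,
          y = PySem.Str.slice string (some i) (some (i + L)) := by
  induction Ls generalizing acc with
  | nil => simp
  | cons L Ls ih =>
    rw [List.foldl_cons, ih, PySem.Set.mem_foldl_add]
    constructor
    · rintro (⟨hy | ⟨i, hi, rfl⟩⟩ | ⟨L', hL', i, hi, rfl⟩)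
      · exact Or.inl hy
      · exact Or.inr ⟨L, List.mem_cons_self, i, hi, rfl⟩
      · exact Or.inr ⟨L', List.mem_cons_of_mem _ hL', i, hi, rfl⟩
    · rintro (hy | ⟨L', hL', i, hi, rfl⟩)
      · exact Or.inl (Or.inl hy)
      · rcases List.mem_cons.mp hL' with rfl | hL'
        · exact Or.inl (Or.inr ⟨i, hi, rfl⟩)
        · exact Or.inr ⟨L', hL', i, hi, rfl⟩

theorem mem_cuteSubs_iff (matrix : List String) (string : String) (y : String) :
    y ∈ cuteSubs matrix string ↔
      ∃ L ∈ PySem.Set.ofList (matrix.map (fun s => PySem.Str.len s)),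
        ∃ i ∈ PySem.List.pyRange 0 (PySem.Str.len string - L + 1) 1,
          y = PySem.Str.slice string (some i) (some (i + L)) := by
  unfold cuteSubs
  rw [mem_nested_fold]
  simp [PySem.Set.empty]

-- a slice of the haystack taken by B is an infix of it
theorem slice_infix (string : String) (i L : Int) (hi : 0 ≤ i) (hL : 0 ≤ L) :
    (PySem.Str.slice string (some i) (some (i + L))).toList <:+: string.toList := by
  rw [PySem.Str.toList_slice, PySem.Chars.slice_eq_listSlice]
  rw [PySem.List.slice_toNat _ hi (by omega)]
  exact ((List.take_prefix _ _).isInfix).trans (List.drop_suffix _ _).isInfix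

-- for s ∈ matrix, membership in cuteSubs is exactly Python's substring test
theorem mem_cuteSubs_eq_isIn (matrix : List String) (string : String) (s : String)
    (hs : s ∈ matrix) : (s ∈ cuteSubs matrix string) ↔ PySem.Str.isIn s string = true := by
  rw [mem_cuteSubs_iff]
  constructor
  · rintro ⟨L, hLmem, i, hi, rfl⟩
    rw [PySem.List.mem_pyRange_one] at hi
    rw [PySem.Str.isIn_iff_infix]
    have hL : 0 ≤ L := by
      rw [PySem.Set.mem_ofList, List.mem_map] at hLmem
      obtain ⟨t, _, rfl⟩ := hLmem
      simp [PySem.Str.len_eq]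
    exact slice_infix string i L hi.1 hL
  · intro h
    have h' := (PySem.Str.isIn_iff_infix s string).mp h
    obtain ⟨j0, hj0⟩ := (PySem.Chars.exists_prefix_drop_iff_isIn s.toList string.toList).mpr
      (by rw [PySem.Chars.isIn_iff_infix]; exact h')
    -- normalize the drop index into range
    set n := string.toList.length with hn
    set j := min j0 n with hjdef
    have hj : s.toList <+: List.drop j string.toList := by
      rcases le_or_gt j0 n with hle | hgt
      · simpa [hjdef, min_eq_left hle] using hj0
      · have hd : List.drop j0 string.toList = [] := List.drop_eq_nil_of_le (by omega)
        have hnil : s.toList = [] := List.prefix_nil.mp (hd ▸ hj0)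
        simp [hnil]
    have hjle : j ≤ n := min_le_right _ _
    have hlen := hj.length_le
    simp only [List.length_drop] at hlen
    refine ⟨PySem.Str.len s, ?_, (j : Int), ?_, ?_⟩
    · rw [PySem.Set.mem_ofList, List.mem_map]; exact ⟨s, hs, rfl⟩
    · rw [PySem.List.mem_pyRange_one]
      rw [PySem.Str.len_eq, PySem.Str.len_eq, ← hn]
      constructor
      · positivity
      · omega
    · have htake : s.toList = (List.drop j string.toList).take s.toList.length :=
        List.prefix_iff_eq_take.mp hj
      apply String.toList_inj.mp
      rw [PySem.Str.toList_slice, PySem.Chars.slice_eq_listSlice]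
      rw [PySem.Str.len_eq, PySem.List.slice_natCast_add]
      exact htake

-- ===== VERDICT (by name: the statement is the Claim_ definition above) =====
theorem cuteCat_spec : Claim_equal_cuteCat := by
  intro matrix string _
  unfold Spec_cuteCat cuteCat_alt cuteCat
  have h : (fun (res : List String) (i : String) =>
      if PySem.Str.isIn i string then res ++ ["Yes"] else res ++ ["No"])
      = fun res i => res ++ [if PySem.Str.isIn i string then "Yes" else "No"] := by
    funext res i; split_ifs <;> rfl
  rw [h, PySem.List.foldl_append_singleton_eq_map]
  rw [List.nil_append]
  refine List.map_congr_left ?_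
  intro s hs
  have hmem := mem_cuteSubs_eq_isIn matrix string s hs
  by_cases hin : PySem.Str.isIn s string = true
  · rw [if_pos hin, if_pos (by rw [PySem.Set.contains_iff]; exact hmem.mpr hin)]
  · rw [if_neg hin, if_neg (fun hc => hin (hmem.mp ((PySem.Set.contains_iff _ _).mp hc)))]
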